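-- pv_equiv track=rewrite | github.com/YOUNGGOAT34/LeetCode | march/countDaysWithoutMeeting.py | countDays
-- ===== SOURCE A (Python) =====
-- from typing import List
--
-- def countDays(days: int, meetings: List[List[int]]) -> int:
--     previousEnd=0
--     meetings.sort()
--     for startInterval,endInterval in meetings:
--         startInterval=max(startInterval,previousEnd+1)
--         daysMeetingTook=endInterval-startInterval+1 # +1 because the start and end intervals are inclusive
--         previousEnd=max(previousEnd,endInterval)
--
--         days-=max(daysMeetingTook,0) #incase the days become 0
--
--     return days
-- ===== SOURCE B (Python) =====
-- from typing import List
--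
-- def countDays(days: int, meetings: List[List[int]]) -> int:
--     # Sweep line over boundary events (A sorts `meetings` in place; B does not
--     # mutate it -- the equivalence is about the return value).
--     events = []
--     for s, e in meetings:
--         s = max(s, 1)
--         if s <= e:
--             events.append((s, 1))
--             events.append((e + 1, -1))
--     events.sort()
--     covered = 0
--     active = 0
--     prev = 0
--     for x, delta in events:
--         if active > 0:
--             covered += x - prev
--         prev = x
--         active += delta
--     return days - covered
-- ===== Notes on version B (the rewrite author's own statement) =====
-- stated objective: alternative
-- what changed: Instead of sorting the meetings and sweeping them with a running previousEnd, B builds +1/-1 boundary events from the unsorted meetings, sorts the events, and integrates the segments where the active-meeting counter is positive.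
import Mathlib
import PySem

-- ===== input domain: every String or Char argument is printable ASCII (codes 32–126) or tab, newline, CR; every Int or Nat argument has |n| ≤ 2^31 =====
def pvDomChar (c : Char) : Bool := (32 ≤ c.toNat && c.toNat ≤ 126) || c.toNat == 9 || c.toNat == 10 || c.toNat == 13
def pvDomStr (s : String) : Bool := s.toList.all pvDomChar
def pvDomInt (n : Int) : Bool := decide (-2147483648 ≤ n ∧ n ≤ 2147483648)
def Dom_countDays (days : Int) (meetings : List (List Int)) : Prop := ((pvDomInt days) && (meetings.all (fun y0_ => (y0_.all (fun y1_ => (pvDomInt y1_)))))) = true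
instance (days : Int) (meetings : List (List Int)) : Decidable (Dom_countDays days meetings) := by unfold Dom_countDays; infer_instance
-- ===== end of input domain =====

-- B replaces A's sort-the-meetings-and-subtract sweep by a boundary-event sweep line:
-- +1/-1 events built from the unsorted meetings, sorted, then integrated where the
-- active counter is positive (alternative algorithm). A sorts `meetings` IN PLACE in
-- Python, B does not mutate it; the equivalence proved here is about the return value.

-- ===== PORT A =====
-- loop body of A's `for startInterval,endInterval in meetings:` (state = (days, previousEnd));
-- a meeting that is not a length-2 list raises ValueError in Python (excluded by Pre_): state kept unchanged here
def stepA (st : Int × Int) (m : List Int) : Int × Int :=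
  match m with
  | [startInterval, endInterval] =>
    let s := max startInterval (st.2 + 1)
    let daysMeetingTook := endInterval - s + 1
    (st.1 - max daysMeetingTook 0, max st.2 endInterval)
  | _ => st

def countDays (days : Int) (meetings : List (List Int)) : Int :=
  -- meetings.sort(): Python's lexicographic list order = Lean's order on List Int
  (((PySem.List.sorted meetings (fun m => m)).foldl stepA (days, 0))).1

-- ===== PORT B =====
-- B's first loop: build the boundary events (a non-pair meeting raises in Python, excluded by Pre_)
def eventsOf (meetings : List (List Int)) : List (Int × Int) :=
  meetings.foldl (fun acc m =>
    match m with
    | [s0, e] =>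
      let s := max s0 1
      if s ≤ e then acc ++ [(s, 1), (e + 1, -1)] else acc
    | _ => acc) []

-- B's second loop: state = (covered, prev, active)
def sweepStep (st : Int × Int × Int) (ev : Int × Int) : Int × Int × Int :=
  (st.1 + (if 0 < st.2.2 then ev.1 - st.2.1 else 0), ev.1, st.2.2 + ev.2)

def countDays_alt (days : Int) (meetings : List (List Int)) : Int :=
  -- events.sort(): Python sorts the pairs lexicographically = PySem.List.sorted2
  let es := PySem.List.sorted2 (eventsOf meetings) (fun ev => ev.1) (fun ev => ev.2)
  let st := es.foldl sweepStep (0, 0, 0)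
  days - st.1

-- ===== PRECONDITION & SPEC =====
-- Pre_ excludes exactly the inputs on which A raises: a meeting that is not a length-2
-- list makes `for startInterval,endInterval in meetings` raise ValueError.
def Pre_countDays (days : Int) (meetings : List (List Int)) : Prop :=
  ∀ m ∈ meetings, m.length = 2
instance (days : Int) (meetings : List (List Int)) : Decidable (Pre_countDays days meetings) := by
  unfold Pre_countDays; infer_instance
def pvWitness_countDays : Int × List (List Int) := (10, [[5, 7], [1, 3]])

def Spec_countDays (days : Int) (meetings : List (List Int)) (out : Int) : Prop := out = countDays_alt days meetings
instance (days : Int) (meetings : List (List Int)) (out : Int) : Decidable (Spec_countDays days meetings out) := by unfold Spec_countDays; infer_instance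

-- ===== CLAIM (what is proved, stated in full; the proofs are below) =====
def Claim_equal_countDays : Prop := ∀ (days : Int) (meetings : List (List Int)), Dom_countDays days meetings → Pre_countDays days meetings → Spec_countDays days meetings (countDays days meetings)

-- ===== LEMMAS AND PROOFS =====

-- ---------- A-side: A's fold equals a block-merge over the clipped valid intervals ----------

-- merge loop on lists (intermediate between A and the intervals): state = (covered, current block)
def stepB (st : Int × Option (Int × Int)) (m : List Int) : Int × Option (Int × Int) :=
  match m with
  | [s0, e] =>
    let s := max s0 1
    if e < s then st
    else
      match st.2 with
      | none => (st.1, some (s, e))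
      | some (bs, be) =>
        if be + 1 < s then (st.1 + (be - bs + 1), some (s, e))
        else (st.1, some (bs, max be e))
  | _ => st

-- total covered days recorded in a merge state
def finishB (st : Int × Option (Int × Int)) : Int :=
  st.1 + (match st.2 with | none => 0 | some (bs, be) => be - bs + 1)

-- invariant tying A's previousEnd `p` to the merge's current block, relative to the remaining meetings
def InvAB (p : Int) (blk : Option (Int × Int)) (l : List (List Int)) : Prop :=
  match blk with
  | none => 0 ≤ p ∧ ∀ m ∈ l, p + 1 ≤ max (m.getD 0 0) 1
  | some (bs, be) => 1 ≤ bs ∧ bs ≤ be ∧ be ≤ p ∧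
      ∀ m ∈ l, p + 1 ≤ max (be + 1) (max (m.getD 0 0) 1)

theorem head_le_of_le_pair (a0 a1 b0 b1 : Int) (h : ([a0, a1] : List Int) ≤ [b0, b1]) :
    a0 ≤ b0 := by
  by_cases h' : a0 ≤ b0
  · exact h'
  · exfalso
    have hlt : b0 < a0 := by omega
    have : ([b0, b1] : List Int) < [a0, a1] := List.Lex.rel hlt
    exact absurd this (not_lt_of_ge h)

theorem main_loop (l : List (List Int)) :
    ∀ (d p c : Int) (blk : Option (Int × Int)),
    (∀ m ∈ l, m.length = 2) →
    l.Pairwise (· ≤ ·) →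
    InvAB p blk l →
    (l.foldl stepA (d, p)).1 =
      d - (finishB (l.foldl stepB (c, blk)) - finishB (c, blk)) := by
  induction l with
  | nil => intro d p c blk _ _ _; simp
  | cons m rest ih =>
    intro d p c blk hlen hsort hinv
    obtain ⟨s0, e, hm⟩ : ∃ s0 e, m = [s0, e] := by
      have h2 := hlen m (by simp)
      match m, h2 with
      | [a, b], _ => exact ⟨a, b, rfl⟩
    subst hm
    have hsort' : rest.Pairwise (· ≤ ·) := hsort.tail
    have hhd : ∀ m' ∈ rest, ([s0, e] : List Int) ≤ m' := (List.pairwise_cons.mp hsort).1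
    have hrs : ∀ m' ∈ rest, s0 ≤ m'.getD 0 0 := by
      intro m' hm'
      obtain ⟨s1, e1, hm1⟩ : ∃ s1 e1, m' = [s1, e1] := by
        have h2 := hlen m' (by simp [hm'])
        match m', h2 with
        | [a, b], _ => exact ⟨a, b, rfl⟩
      subst hm1
      simpa using head_le_of_le_pair s0 e s1 e1 (hhd _ hm')
    have hlen' : ∀ m' ∈ rest, m'.length = 2 := fun m' h => hlen m' (by simp [h])
    simp only [List.foldl_cons]
    rcases blk with _ | ⟨bs, be⟩
    · -- no current block
      obtain ⟨hp0, hall⟩ := hinv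
      have hs : p + 1 ≤ max s0 1 := by simpa using hall [s0, e] (by simp)
      have hsp : max s0 (p + 1) = max s0 1 := by
        rcases max_cases s0 (p + 1) with ⟨h1, h1'⟩ | ⟨h1, h1'⟩ <;>
          rcases max_cases s0 (1 : Int) with ⟨h2, h2'⟩ | ⟨h2, h2'⟩ <;> omega
      by_cases he : e < max s0 1
      · -- reversed/empty interval: both sides skip (A's contribution is 0)
        have hA : stepA (d, p) [s0, e] = (d, max p e) := by
          simp only [stepA, Prod.mk.injEq, hsp]
          refine ⟨?_, trivial⟩
          rcases max_cases (e - max s0 1 + 1) (0 : Int) with ⟨h1, h1'⟩ | ⟨h1, h1'⟩ <;> omega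
        have hB : stepB (c, none) [s0, e] = (c, none) := by
          simp only [stepB]; rw [if_pos he]
        have hinv' : InvAB (max p e) none rest := by
          refine ⟨by rcases max_cases p e with ⟨h1, h1'⟩ | ⟨h1, h1'⟩ <;> omega, ?_⟩
          intro m' hm'
          have h1 := hall m' (by simp [hm'])
          have h2 := hrs m' hm'
          rcases max_cases p e with ⟨h3, h3'⟩ | ⟨h3, h3'⟩ <;>
            rcases max_cases (m'.getD 0 0) (1 : Int) with ⟨h4, h4'⟩ | ⟨h4, h4'⟩ <;>
              rcases max_cases s0 (1 : Int) with ⟨h5, h5'⟩ | ⟨h5, h5'⟩ <;> omega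
        rw [hA, hB, ih d (max p e) c none hlen' hsort' hinv']
      · -- open a new block (max s0 1, e)
        have hA : stepA (d, p) [s0, e] = (d - (e - max s0 1 + 1), e) := by
          simp only [stepA, Prod.mk.injEq, hsp]
          constructor
          · rcases max_cases (e - max s0 1 + 1) (0 : Int) with ⟨h1, h1'⟩ | ⟨h1, h1'⟩ <;> omega
          · rcases max_cases p e with ⟨h1, h1'⟩ | ⟨h1, h1'⟩ <;> omega
        have hB : stepB (c, none) [s0, e] = (c, some (max s0 1, e)) := by
          simp only [stepB]; rw [if_neg he]
        have hinv' : InvAB e (some (max s0 1, e)) rest := by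
          refine ⟨le_max_right s0 1, by omega, le_refl e, ?_⟩
          intro m' hm'
          have h2 := hrs m' hm'
          rcases max_cases (m'.getD 0 0) (1 : Int) with ⟨h4, h4'⟩ | ⟨h4, h4'⟩ <;> omega
        rw [hA, hB, ih (d - (e - max s0 1 + 1)) e c (some (max s0 1, e)) hlen' hsort' hinv']
        cases hfold : List.foldl stepB (c, some (max s0 1, e)) rest with
        | mk F1 F2 => rcases F2 with _ | ⟨G1, G2⟩ <;> simp only [finishB] <;> ring
    · -- current block (bs, be)
      obtain ⟨hbs1, hbsbe, hbep, hall⟩ := hinv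
      have hs : p + 1 ≤ max (be + 1) (max s0 1) := by simpa using hall [s0, e] (by simp)
      by_cases he : e < max s0 1
      · -- skip
        have hA : stepA (d, p) [s0, e] = (d, max p e) := by
          simp only [stepA, Prod.mk.injEq]
          refine ⟨?_, trivial⟩
          rcases max_cases s0 (p + 1) with ⟨h1, h1'⟩ | ⟨h1, h1'⟩ <;>
            rcases max_cases s0 (1 : Int) with ⟨h2, h2'⟩ | ⟨h2, h2'⟩ <;>
              rcases max_cases (e - max s0 (p + 1) + 1) (0 : Int) with ⟨h3, h3'⟩ | ⟨h3, h3'⟩ <;>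
                omega
        have hB : stepB (c, some (bs, be)) [s0, e] = (c, some (bs, be)) := by
          simp only [stepB]; rw [if_pos he]
        have hinv' : InvAB (max p e) (some (bs, be)) rest := by
          refine ⟨hbs1, hbsbe, by rcases max_cases p e with ⟨h1, h1'⟩ | ⟨h1, h1'⟩ <;> omega, ?_⟩
          intro m' hm'
          have h1 := hall m' (by simp [hm'])
          have h2 := hrs m' hm'
          rcases max_cases p e with ⟨h3, h3'⟩ | ⟨h3, h3'⟩ <;>
            rcases max_cases (m'.getD 0 0) (1 : Int) with ⟨h4, h4'⟩ | ⟨h4, h4'⟩ <;>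
              rcases max_cases s0 (1 : Int) with ⟨h5, h5'⟩ | ⟨h5, h5'⟩ <;>
                rcases max_cases (be + 1) (max (m'.getD 0 0) 1) with ⟨h6, h6'⟩ | ⟨h6, h6'⟩ <;>
                  rcases max_cases (be + 1) (max s0 1) with ⟨h7, h7'⟩ | ⟨h7, h7'⟩ <;> omega
        rw [hA, hB, ih d (max p e) c (some (bs, be)) hlen' hsort' hinv']
      · by_cases hgap : be + 1 < max s0 1
        · -- true gap: close the block, open a new one
          have hp : p + 1 ≤ max s0 1 := by
            rcases max_cases (be + 1) (max s0 1) with ⟨h1, h1'⟩ | ⟨h1, h1'⟩ <;> omega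
          have hsp : max s0 (p + 1) = max s0 1 := by
            rcases max_cases s0 (p + 1) with ⟨h1, h1'⟩ | ⟨h1, h1'⟩ <;>
              rcases max_cases s0 (1 : Int) with ⟨h2, h2'⟩ | ⟨h2, h2'⟩ <;> omega
          have hA : stepA (d, p) [s0, e] = (d - (e - max s0 1 + 1), e) := by
            simp only [stepA, Prod.mk.injEq, hsp]
            constructor
            · rcases max_cases (e - max s0 1 + 1) (0 : Int) with ⟨h1, h1'⟩ | ⟨h1, h1'⟩ <;> omega
            · rcases max_cases p e with ⟨h1, h1'⟩ | ⟨h1, h1'⟩ <;> omega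
          have hB : stepB (c, some (bs, be)) [s0, e] =
              (c + (be - bs + 1), some (max s0 1, e)) := by
            simp only [stepB]
            rw [if_neg he, if_pos hgap]
          have hinv' : InvAB e (some (max s0 1, e)) rest := by
            refine ⟨le_max_right s0 1, by omega, le_refl e, ?_⟩
            intro m' hm'
            have h2 := hrs m' hm'
            rcases max_cases (m'.getD 0 0) (1 : Int) with ⟨h4, h4'⟩ | ⟨h4, h4'⟩ <;> omega
          rw [hA, hB, ih (d - (e - max s0 1 + 1)) e (c + (be - bs + 1))
            (some (max s0 1, e)) hlen' hsort' hinv']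
          cases hfold : List.foldl stepB (c + (be - bs + 1), some (max s0 1, e)) rest with
          | mk F1 F2 => rcases F2 with _ | ⟨G1, G2⟩ <;> simp only [finishB] <;> ring
        · -- overlap/adjacent: extend the block; here p = be
          have hpbe : p = be := by
            rcases max_cases (be + 1) (max s0 1) with ⟨h1, h1'⟩ | ⟨h1, h1'⟩ <;> omega
          have hsp : max s0 (p + 1) = be + 1 := by
            rcases max_cases s0 (p + 1) with ⟨h1, h1'⟩ | ⟨h1, h1'⟩ <;>
              rcases max_cases s0 (1 : Int) with ⟨h2, h2'⟩ | ⟨h2, h2'⟩ <;> omega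
          have hA : stepA (d, p) [s0, e] = (d - max (e - be) 0, max be e) := by
            simp only [stepA, Prod.mk.injEq, hsp]
            refine ⟨by omega, by omega⟩
          have hB : stepB (c, some (bs, be)) [s0, e] = (c, some (bs, max be e)) := by
            simp only [stepB]
            rw [if_neg he, if_neg hgap]
          have hinv' : InvAB (max be e) (some (bs, max be e)) rest := by
            exact ⟨hbs1, le_max_of_le_left hbsbe, le_refl _, fun m' hm' => le_max_left _ _⟩
          rw [hA, hB, ih (d - max (e - be) 0) (max be e) c (some (bs, max be e))
            hlen' hsort' hinv']
          cases hfold : List.foldl stepB (c, some (bs, max be e)) rest with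
          | mk F1 F2 =>
            have hmx : max (e - be) 0 = max be e - be := by omega
            rcases F2 with _ | ⟨G1, G2⟩ <;> simp only [finishB] <;>
              (generalize hMM : max be e = M at hmx ⊢;
               generalize hM0 : max (e - be) 0 = Z at hmx ⊢;
               rw [hmx]; ring)

-- ---------- shared interval layer: clipped valid intervals ----------

-- the clipped valid interval of one meeting (none = contributes nothing)
def clip1 (m : List Int) : Option (Int × Int) :=
  match m with
  | [s0, e] => if e < max s0 1 then none else some (max s0 1, e)
  | _ => none

-- merge step on clipped valid intervals
def mstep (st : Int × Option (Int × Int)) (iv : Int × Int) : Int × Option (Int × Int) :=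
  match st.2 with
  | none => (st.1, some iv)
  | some (bs, be) =>
    if be + 1 < iv.1 then (st.1 + (be - bs + 1), some iv) else (st.1, some (bs, max be iv.2))

theorem stepB_eq_clip (st : Int × Option (Int × Int)) (m : List Int) :
    stepB st m = (match clip1 m with | none => st | some iv => mstep st iv) := by
  match m with
  | [] => rfl
  | [_] => rfl
  | _ :: _ :: _ :: _ => rfl
  | [s0, e] =>
    simp only [stepB, clip1]
    by_cases h : e < max s0 1
    · simp [h]
    · simp [h, mstep]

theorem foldl_stepB_eq_mstep (l : List (List Int)) :
    ∀ st, l.foldl stepB st = (l.filterMap clip1).foldl mstep st := by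
  induction l with
  | nil => intro st; rfl
  | cons m t ih =>
    intro st
    rw [List.foldl_cons, List.filterMap_cons, stepB_eq_clip]
    cases hc : clip1 m
    · simpa using ih st
    · simpa using ih _

-- the two boundary events of one interval
def flat2 (iv : Int × Int) : List (Int × Int) := [(iv.1, 1), (iv.2 + 1, -1)]

-- the valid-interval events of one meeting
def evf (m : List Int) : List (Int × Int) :=
  match clip1 m with
  | some iv => flat2 iv
  | none => []

theorem eventsOf_acc (ms : List (List Int)) :
    ∀ acc, ms.foldl (fun acc m =>
      match m with
      | [s0, e] =>
        let s := max s0 1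
        if s ≤ e then acc ++ [(s, 1), (e + 1, -1)] else acc
      | _ => acc) acc = acc ++ ms.flatMap evf := by
  induction ms with
  | nil => intro acc; simp
  | cons m t ih =>
    intro acc
    rw [List.foldl_cons, List.flatMap_cons, ih]
    have hstep : (match m with
      | [s0, e] =>
        let s := max s0 1
        if s ≤ e then acc ++ [(s, 1), (e + 1, -1)] else acc
      | _ => acc) = acc ++ evf m := by
      match m with
      | [] => simp [evf, clip1]
      | [_] => simp [evf, clip1]
      | a :: b :: x :: r => simp [evf, clip1]
      | [s0, e] =>
        simp only [evf, clip1]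
        by_cases h : e < max s0 1
        · rw [if_neg (by omega), if_pos h]; simp
        · rw [if_pos (by omega), if_neg h]; simp [flat2]
    rw [hstep, List.append_assoc]

theorem flatMap_evf (ms : List (List Int)) :
    ms.flatMap evf = (ms.filterMap clip1).flatMap flat2 := by
  induction ms with
  | nil => rfl
  | cons m t ih =>
    rw [List.flatMap_cons, List.filterMap_cons]
    cases hc : clip1 m
    · simp [evf, hc, ih]
    · simp [evf, hc, ih]

theorem eventsOf_eq_flatMap (ms : List (List Int)) :
    eventsOf ms = (ms.filterMap clip1).flatMap flat2 := by
  rw [eventsOf, eventsOf_acc ms [], flatMap_evf]; rfl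

-- ---------- event order (Python's lexicographic pair order) ----------

def evLE (a b : Int × Int) : Prop := a.1 < b.1 ∨ (a.1 = b.1 ∧ a.2 ≤ b.2)
def evLt (a b : Int × Int) : Prop := a.1 < b.1 ∨ (a.1 = b.1 ∧ a.2 < b.2)

-- the boolean comparator sorted2 uses for Python's lexicographic tuple order
def evBef (a b : Int × Int) : Bool :=
  decide (a.1 < b.1) || (!decide (b.1 < a.1) && decide (a.2 < b.2))

theorem evBef_true {a b : Int × Int} (h : evBef a b = true) : evLt a b := by
  obtain ⟨a1, a2⟩ := a; obtain ⟨b1, b2⟩ := b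
  simp only [evBef] at h; simp only [evLt]
  simp only [Bool.or_eq_true, Bool.and_eq_true, Bool.not_eq_eq_eq_not, Bool.not_true,
    decide_eq_true_eq, decide_eq_false_iff_not] at h
  omega

theorem evBef_false {a b : Int × Int} (h : evBef a b = false) : evLE b a := by
  obtain ⟨a1, a2⟩ := a; obtain ⟨b1, b2⟩ := b
  simp only [evBef] at h; simp only [evLE]
  simp only [Bool.or_eq_false_iff, Bool.and_eq_false_iff, Bool.not_eq_eq_eq_not, Bool.not_false,
    decide_eq_false_iff_not, decide_eq_true_eq] at h
  omega

theorem evLE_of_lt {a b : Int × Int} (h : evLt a b) : evLE a b := by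
  obtain ⟨a1, a2⟩ := a; obtain ⟨b1, b2⟩ := b
  simp only [evLt] at h; simp only [evLE]; omega

theorem evLE_trans {a b c : Int × Int} (h1 : evLE a b) (h2 : evLE b c) : evLE a c := by
  obtain ⟨a1, a2⟩ := a; obtain ⟨b1, b2⟩ := b; obtain ⟨c1, c2⟩ := c
  simp only [evLE] at *; omega

theorem evLt_of_lt_of_le {a b c : Int × Int} (h1 : evLt a b) (h2 : evLE b c) : evLt a c := by
  obtain ⟨a1, a2⟩ := a; obtain ⟨b1, b2⟩ := b; obtain ⟨c1, c2⟩ := c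
  simp only [evLt, evLE] at *; omega

theorem evLt_of_not_le {a b : Int × Int} (h : ¬ evLE a b) : evLt b a := by
  obtain ⟨a1, a2⟩ := a; obtain ⟨b1, b2⟩ := b
  simp only [evLE] at h; simp only [evLt]; omega

theorem evLE_antisymm {a b : Int × Int} (h1 : evLE a b) (h2 : evLE b a) : a = b := by
  obtain ⟨a1, a2⟩ := a; obtain ⟨b1, b2⟩ := b
  simp only [evLE] at *
  have : a1 = b1 ∧ a2 = b2 := by omega
  simp [this.1, this.2]

theorem insertBy_pairwise_evLE (x : Int × Int) (l : List (Int × Int))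
    (hl : l.Pairwise evLE) : (PySem.List.insertBy evBef x l).Pairwise evLE := by
  induction l with
  | nil => simp [PySem.List.insertBy]
  | cons y ys ih =>
    have heq : PySem.List.insertBy evBef x (y :: ys) =
        if evBef x y then x :: y :: ys else y :: PySem.List.insertBy evBef x ys := by
      simp [PySem.List.insertBy]
    rw [heq]
    rcases List.pairwise_cons.mp hl with ⟨hy, hys⟩
    by_cases hb : evBef x y = true
    · rw [if_pos hb]
      refine List.pairwise_cons.mpr ⟨?_, hl⟩
      intro z hz
      rcases List.mem_cons.mp hz with hz | hz
      · subst hz; exact evLE_of_lt (evBef_true hb)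
      · exact evLE_trans (evLE_of_lt (evBef_true hb)) (hy z hz)
    · rw [if_neg hb]
      refine List.pairwise_cons.mpr ⟨?_, ih hys⟩
      intro z hz
      rcases (PySem.List.mem_insertBy evBef x z ys).mp hz with hz | hz
      · subst hz; exact evBef_false (by simpa using hb)
      · exact hy z hz

theorem foldl_insertBy_pairwise (xs : List (Int × Int)) :
    ∀ acc, acc.Pairwise evLE →
      (xs.foldl (fun acc x => PySem.List.insertBy evBef x acc) acc).Pairwise evLE := by
  induction xs with
  | nil => intro acc h; exact h
  | cons x t ih => intro acc h; exact ih _ (insertBy_pairwise_evLE x acc h)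

theorem sorted2_eq_foldl (xs : List (Int × Int)) :
    PySem.List.sorted2 xs (fun ev => ev.1) (fun ev => ev.2) =
      xs.foldl (fun acc x => PySem.List.insertBy evBef x acc) [] := rfl

theorem sorted2_pairwise_evLE (xs : List (Int × Int)) :
    (PySem.List.sorted2 xs (fun ev => ev.1) (fun ev => ev.2)).Pairwise evLE := by
  rw [sorted2_eq_foldl]
  exact foldl_insertBy_pairwise xs [] (by simp)

theorem sorted2_eq_of_perm_of_pairwise (xs M : List (Int × Int))
    (hp : M.Perm xs) (hM : M.Pairwise evLE) :
    PySem.List.sorted2 xs (fun ev => ev.1) (fun ev => ev.2) = M := by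
  refine List.Perm.eq_of_pairwise (le := evLE) ?_ (sorted2_pairwise_evLE xs) hM ?_
  · intro a b _ _ h1 h2; exact evLE_antisymm h1 h2
  · exact ((PySem.List.sorted2_perm xs _ _ false).trans hp.symm)

-- ---------- sweep telescope ----------

def sumd (P : List (Int × Int)) : Int := (P.map Prod.snd).sum

def lastCoord (p : Int) (P : List (Int × Int)) : Int :=
  match P.getLast? with
  | some ev => ev.1
  | none => p

theorem sumd_nil : sumd [] = 0 := rfl

theorem sumd_cons (ev : Int × Int) (P : List (Int × Int)) : sumd (ev :: P) = ev.2 + sumd P := by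
  simp [sumd]

theorem sumd_append (A B : List (Int × Int)) : sumd (A ++ B) = sumd A + sumd B := by
  simp [sumd]

theorem lastCoord_nil (p : Int) : lastCoord p [] = p := rfl

theorem lastCoord_cons (p : Int) (ev : Int × Int) (P : List (Int × Int)) :
    lastCoord p (ev :: P) = lastCoord ev.1 P := by
  cases P with
  | nil => rfl
  | cons x P =>
    simp only [lastCoord, List.getLast?_cons_cons]
    cases hx : (x :: P).getLast? with
    | none => exact absurd (List.getLast?_eq_none_iff.mp hx) (by simp)
    | some e => rfl

theorem lastCoord_concat (p : Int) (l : List (Int × Int)) (a : Int × Int) :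
    lastCoord p (l ++ [a]) = a.1 := by
  simp only [lastCoord, List.getLast?_concat]

theorem lastCoord_append (p : Int) (A B : List (Int × Int)) (hB : B ≠ []) :
    lastCoord p (A ++ B) = lastCoord p B := by
  simp only [lastCoord, List.getLast?_append]
  cases hx : B.getLast? with
  | none => exact absurd (List.getLast?_eq_none_iff.mp hx) hB
  | some ev => rfl

theorem triple_ext {x1 x2 x3 y1 y2 y3 : Int} (h1 : x1 = y1) (h2 : x2 = y2) (h3 : x3 = y3) :
    ((x1, x2, x3) : Int × Int × Int) = (y1, y2, y3) := by simp [h1, h2, h3]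

theorem sweep_telescope (P : List (Int × Int)) :
    ∀ (c p a : Int),
    (∀ P₁ ev P₂, P = P₁ ++ ev :: P₂ →
        (0 < a + sumd P₁ ∨ ev.1 = lastCoord p P₁) ∧ 0 ≤ a + sumd P₁) →
    P.foldl sweepStep (c, p, a) = (c + lastCoord p P - p, lastCoord p P, a + sumd P) := by
  induction P with
  | nil =>
    intro c p a _
    simp only [List.foldl_nil, lastCoord_nil, sumd_nil]
    exact (triple_ext (by ring) rfl (by ring)).symm
  | cons ev P ih =>
    intro c p a h
    have h0 := h [] ev P rfl
    rw [sumd_nil, lastCoord_nil] at h0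
    have hstep : sweepStep (c, p, a) ev = (c + ev.1 - p, ev.1, a + ev.2) := by
      refine triple_ext ?_ rfl rfl
      by_cases ha : 0 < a
      · rw [if_pos ha]; ring
      · rw [if_neg ha]
        rcases h0 with ⟨h01 | h01, h02⟩
        · omega
        · rw [h01]; ring
    rw [List.foldl_cons, hstep, ih (c + ev.1 - p) ev.1 (a + ev.2) ?cond]
    case cond =>
      intro P₁ ev' P₂ hP
      have hh := h (ev :: P₁) ev' P₂ (by simp [hP])
      rw [sumd_cons, lastCoord_cons] at hh
      rcases hh with ⟨h1 | h1, h2⟩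
      · exact ⟨Or.inl (by omega), by omega⟩
      · exact ⟨Or.inr h1, by omega⟩
    rw [lastCoord_cons, sumd_cons]
    exact triple_ext (by ring) rfl (by ring)

-- ---------- splitting a sorted event list at a pivot ----------

theorem sorted_split (T : List (Int × Int)) (hs : T.Pairwise evLE) (z : Int × Int) :
    ∃ A R, T = A ++ R ∧ (∀ ev ∈ A, evLE ev z) ∧ (∀ ev ∈ R, evLt z ev) := by
  induction T with
  | nil => exact ⟨[], [], rfl, by simp, by simp⟩
  | cons ev T ih =>
    rcases List.pairwise_cons.mp hs with ⟨hhd, ht⟩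
    by_cases hle : evLE ev z
    · obtain ⟨A, R, hT, hA, hR⟩ := ih ht
      refine ⟨ev :: A, R, by rw [hT]; rfl, ?_, hR⟩
      intro y hy
      rcases List.mem_cons.mp hy with hy | hy
      · subst hy; exact hle
      · exact hA y hy
    · refine ⟨[], ev :: T, rfl, by simp, ?_⟩
      intro y hy
      rcases List.mem_cons.mp hy with hy | hy
      · subst hy; exact evLt_of_not_le hle
      · exact evLt_of_lt_of_le (evLt_of_not_le hle) (hhd y hy)

theorem getLast?_append_ne {α : Type} (l l' : List α) (h : l' ≠ []) :
    (l ++ l').getLast? = l'.getLast? := by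
  rw [List.getLast?_append]
  cases hx : l'.getLast? with
  | none => exact absurd (List.getLast?_eq_none_iff.mp hx) h
  | some a => rfl

theorem lastCoord_le {p x : Int} (A : List (Int × Int)) (hp : p ≤ x)
    (hA : ∀ ev ∈ A, ev.1 ≤ x) : lastCoord p A ≤ x := by
  cases hl : A.getLast? with
  | none => simpa [lastCoord, hl] using hp
  | some ev =>
    have : ev ∈ A := List.mem_of_getLast? hl
    simpa [lastCoord, hl] using hA ev this

theorem evLE_mono_be {ev : Int × Int} {be be' : Int} (h : evLE ev (be + 1, -1)) (hb : be ≤ be') :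
    evLE ev (be' + 1, -1) := by
  obtain ⟨a1, a2⟩ := ev
  simp only [evLE] at *
  omega

theorem evLE_pair {a1 a2 b1 b2 : Int} :
    evLE (a1, a2) (b1, b2) ↔ (a1 < b1 ∨ (a1 = b1 ∧ a2 ≤ b2)) := Iff.rfl

theorem evLt_pair {a1 a2 b1 b2 : Int} :
    evLt (a1, a2) (b1, b2) ↔ (a1 < b1 ∨ (a1 = b1 ∧ a2 < b2)) := Iff.rfl

theorem le_of_evLE_fst {a b : Int × Int} (h : evLE a b) : a.1 ≤ b.1 := by
  obtain ⟨a1, a2⟩ := a; obtain ⟨b1, b2⟩ := b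
  rw [evLE_pair] at h
  show a1 ≤ b1
  omega

theorem fst_le_of_evLt {a b : Int × Int} (h : evLt a b) : a.1 ≤ b.1 := by
  obtain ⟨a1, a2⟩ := a; obtain ⟨b1, b2⟩ := b
  rw [evLt_pair] at h
  show a1 ≤ b1
  omega

theorem lt_fst_of_evLt_pm {s : Int} {ev : Int × Int} (h : evLt (s, 1) ev)
    (hd : ev.2 = 1 ∨ ev.2 = -1) : s < ev.1 := by
  obtain ⟨a1, a2⟩ := ev
  rw [evLt_pair] at h
  show s < a1
  simp only [] at hd
  omega

-- folding one whole block of events: covered grows by the block's length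
theorem block_fold (T : List (Int × Int)) (bs be : Int)
    (hTlast : T.getLast? = some (be + 1, -1)) (hTsum : sumd T = -1)
    (hTpre : ∀ T₁ ev T₂, T = T₁ ++ ev :: T₂ →
        (0 < 1 + sumd T₁ ∨ ev.1 = lastCoord bs T₁) ∧ 0 ≤ 1 + sumd T₁)
    (x q : Int) :
    ((bs, 1) :: T).foldl sweepStep (x, q, 0) = (x + (be + 1 - bs), be + 1, 0) := by
  rw [List.foldl_cons]
  have h1 : sweepStep (x, q, 0) (bs, 1) = (x, bs, 1) := by
    refine triple_ext ?_ rfl (by ring)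
    rw [if_neg (lt_irrefl 0)]; ring
  rw [h1, sweep_telescope T x bs 1 hTpre]
  have h2 : lastCoord bs T = be + 1 := by simp [lastCoord, hTlast]
  rw [h2, hTsum]
  exact triple_ext (by ring) rfl (by ring)

-- ---------- the main invariant: merge state vs sorted events ----------

theorem main_inv (I : List (Int × Int))
    (hval : ∀ iv ∈ I, 1 ≤ iv.1 ∧ iv.1 ≤ iv.2)
    (hsort : I.Pairwise (fun a b => a.1 ≤ b.1)) :
    (I.foldl mstep ((0:Int), none) = ((0:Int), none) ∧ I = []) ∨
    (∃ C bs be E₀ T, I.foldl mstep ((0:Int), none) = (C, some (bs, be)) ∧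
      (I.flatMap flat2).Perm (E₀ ++ (bs, 1) :: T) ∧
      (E₀ ++ (bs, 1) :: T).Pairwise evLE ∧
      (∀ ev ∈ E₀, ev.1 < bs) ∧
      (∀ ev ∈ T, bs ≤ ev.1 ∧ evLE ev (be + 1, -1) ∧ (ev.2 = 1 ∨ ev.2 = -1)) ∧
      (∀ c p : Int, ∃ p', E₀.foldl sweepStep (c, p, 0) = (c + C, p', 0)) ∧
      T ≠ [] ∧ T.getLast? = some (be + 1, -1) ∧ sumd T = -1 ∧
      (∀ T₁ ev T₂, T = T₁ ++ ev :: T₂ →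
          (0 < 1 + sumd T₁ ∨ ev.1 = lastCoord bs T₁) ∧ 0 ≤ 1 + sumd T₁) ∧
      1 ≤ bs ∧ bs ≤ be ∧ (∃ e', (bs, e') ∈ I)) := by
  induction I using List.reverseRecOn with
  | nil => exact Or.inl ⟨rfl, rfl⟩
  | append_singleton I iv ih =>
    obtain ⟨s, e⟩ := iv
    have hval' : ∀ x ∈ I, 1 ≤ x.1 ∧ x.1 ≤ x.2 := fun x hx => hval x (List.mem_append_left _ hx)
    have hsort' : I.Pairwise (fun a b => a.1 ≤ b.1) := (List.pairwise_append.mp hsort).1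
    have hcross : ∀ a ∈ I, a.1 ≤ s := by
      intro a ha
      exact (List.pairwise_append.mp hsort).2.2 a ha (s, e) (by simp)
    have hv := hval (s, e) (List.mem_append_right _ (by simp))
    have hs1 : 1 ≤ s := hv.1
    have hse : s ≤ e := hv.2
    rw [List.foldl_append, List.foldl_cons, List.foldl_nil]
    rcases ih hval' hsort' with ⟨hfold, hInil⟩ |
      ⟨C, bs, be, E₀, T, hfold, hperm, hsortE, hE0, hT, hE0fold, hTne, hTlast, hTsum, hTpre,
        hbs1, hbsbe, hbsmem⟩
    · -- first interval: open the first block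
      subst hInil
      right
      refine ⟨0, s, e, [], [(e + 1, -1)], by rw [hfold]; rfl, ?_, ?_, by simp, ?_, ?_,
        by simp, by simp, by simp [sumd], ?_, hs1, hse, ⟨e, by simp⟩⟩
      · simp [flat2]
      · refine List.pairwise_cons.mpr ⟨?_, by simp⟩
        intro y hy
        simp only [List.mem_singleton] at hy
        subst hy
        exact Or.inl (by show s < e + 1; omega)
      · intro ev hev
        simp only [List.mem_singleton] at hev
        subst hev
        exact ⟨by show s ≤ e + 1; omega, Or.inr ⟨rfl, le_refl _⟩, Or.inr rfl⟩
      · intro c p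
        exact ⟨p, (triple_ext (by ring) rfl rfl)⟩
      · intro T₁ ev T₂ h
        rcases T₁ with _ | ⟨y, ys⟩
        · simp only [List.nil_append, List.cons.injEq] at h
          exact ⟨Or.inl (by rw [sumd_nil]; omega), by rw [sumd_nil]; omega⟩
        · exfalso
          simp only [List.cons_append, List.cons.injEq] at h
          exact absurd h.2.symm (by simp)
    · have hbss : bs ≤ s := by
        obtain ⟨e', he'⟩ := hbsmem
        exact hcross _ he'
      by_cases hgap : be + 1 < s
      · -- gap: close the block and open a new one
        right
        refine ⟨C + (be - bs + 1), s, e, E₀ ++ (bs, 1) :: T, [(e + 1, -1)], ?_, ?_, ?_, ?_, ?_,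
          ?_, by simp, by simp, by simp [sumd], ?_, hs1, hse, ⟨e, by simp⟩⟩
        · rw [hfold]
          show (if be + 1 < s then (C + (be - bs + 1), some (s, e))
                else (C, some (bs, max be e))) = _
          rw [if_pos hgap]
        · rw [List.flatMap_append]
          have h2 : List.flatMap flat2 [(s, e)] = [(s, 1), (e + 1, -1)] := by simp [flat2]
          rw [h2]
          exact hperm.append (List.Perm.refl _)
        · -- sortedness
          rw [List.pairwise_append]
          have hlt : ∀ a ∈ E₀ ++ (bs, 1) :: T, a.1 < s := by
            intro a ha
            rcases List.mem_append.mp ha with ha | ha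
            · have := hE0 a ha; omega
            · rcases List.mem_cons.mp ha with ha | ha
              · subst ha; show bs < s; omega
              · have := le_of_evLE_fst (hT a ha).2.1; omega
          refine ⟨hsortE, ?_, ?_⟩
          · refine List.pairwise_cons.mpr ⟨?_, by simp⟩
            intro y hy
            simp only [List.mem_singleton] at hy
            subst hy
            exact Or.inl (by show s < e + 1; omega)
          · intro a ha b hb
            rcases List.mem_cons.mp hb with hb | hb
            · subst hb; exact Or.inl (hlt a ha)
            · simp only [List.mem_singleton] at hb
              subst hb
              exact Or.inl (by have := hlt a ha; show a.1 < e + 1; omega)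
        · intro ev hev
          rcases List.mem_append.mp hev with h | h
          · have := hE0 ev h; omega
          · rcases List.mem_cons.mp h with h | h
            · subst h; show bs < s; omega
            · have := le_of_evLE_fst (hT ev h).2.1; omega
        · intro ev hev
          simp only [List.mem_singleton] at hev
          subst hev
          exact ⟨by show s ≤ e + 1; omega, Or.inr ⟨rfl, le_refl _⟩, Or.inr rfl⟩
        · intro c p
          obtain ⟨p', hp'⟩ := hE0fold c p
          refine ⟨be + 1, ?_⟩
          rw [List.foldl_append, hp', block_fold T bs be hTlast hTsum hTpre (c + C) p']
          exact triple_ext (by ring) rfl rfl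
        · intro T₁ ev T₂ h
          rcases T₁ with _ | ⟨y, ys⟩
          · simp only [List.nil_append, List.cons.injEq] at h
            exact ⟨Or.inl (by rw [sumd_nil]; omega), by rw [sumd_nil]; omega⟩
          · exfalso
            simp only [List.cons_append, List.cons.injEq] at h
            exact absurd h.2.symm (by simp)
      · -- extend the current block
        have hsle : s ≤ be + 1 := by omega
        have hsE := List.pairwise_append.mp hsortE
        have hbsT : ∀ ev ∈ T, evLE (bs, 1) ev := (List.pairwise_cons.mp hsE.2.1).1
        have hTsorted : T.Pairwise evLE := (List.pairwise_cons.mp hsE.2.1).2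
        obtain ⟨A, R, hTAR, hA, hR⟩ := sorted_split T hTsorted (s, 1)
        have hARs := List.pairwise_append.mp (hTAR ▸ hTsorted)
        have hAsorted : A.Pairwise evLE := hARs.1
        have hRsorted : R.Pairwise evLE := hARs.2.1
        have hARcross : ∀ a ∈ A, ∀ b ∈ R, evLE a b := hARs.2.2
        obtain ⟨Cl, D, hRCD, hCl, hD⟩ := sorted_split R hRsorted (e + 1, -1)
        have hCDs := List.pairwise_append.mp (hRCD ▸ hRsorted)
        have hClsorted : Cl.Pairwise evLE := hCDs.1
        have hDsorted : D.Pairwise evLE := hCDs.2.1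
        have hCDcross : ∀ a ∈ Cl, ∀ b ∈ D, evLE a b := hCDs.2.2
        have hTeq : T = A ++ (Cl ++ D) := by rw [hTAR, hRCD]
        have hmemA : ∀ ev ∈ A, ev ∈ T := fun ev h => by
          rw [hTeq]; exact List.mem_append_left _ h
        have hmemCl : ∀ ev ∈ Cl, ev ∈ T := fun ev h => by
          rw [hTeq]; exact List.mem_append_right _ (List.mem_append_left _ h)
        have hmemD : ∀ ev ∈ D, ev ∈ T := fun ev h => by
          rw [hTeq]; exact List.mem_append_right _ (List.mem_append_right _ h)
        have hmemR : ∀ ev ∈ R, ev ∈ T := fun ev h => by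
          rw [hTAR]; exact List.mem_append_right _ h
        have hClgt : ∀ ev ∈ Cl, s < ev.1 := fun ev h =>
          lt_fst_of_evLt_pm (hR ev (hRCD ▸ List.mem_append_left _ h))
            (hT ev (hmemCl ev h)).2.2
        have hDgt : ∀ ev ∈ D, s < ev.1 := fun ev h =>
          lt_fst_of_evLt_pm (hR ev (hRCD ▸ List.mem_append_right _ h))
            (hT ev (hmemD ev h)).2.2
        have hAle : ∀ ev ∈ A, ev.1 ≤ s := fun ev h => le_of_evLE_fst (hA ev h)
        have hClle : ∀ ev ∈ Cl, ev.1 ≤ e + 1 := fun ev h => le_of_evLE_fst (hCl ev h)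
        have hDge : ∀ ev ∈ D, e + 1 ≤ ev.1 := fun ev h => fst_le_of_evLt (hD ev h)
        have hM1 : be ≤ max be e := le_max_left _ _
        have hM2 : e ≤ max be e := le_max_right _ _
        have hM3 : max be e = be ∨ max be e = e := max_choice be e
        right
        refine ⟨C, bs, max be e, E₀, A ++ (s, 1) :: (Cl ++ (e + 1, -1) :: D), ?_, ?_, ?_, hE0,
          ?_, hE0fold, by simp, ?_, ?_, ?_, hbs1, by omega, ?_⟩
        · rw [hfold]
          show (if be + 1 < s then (C + (be - bs + 1), some (s, e))
                else (C, some (bs, max be e))) = _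
          rw [if_neg hgap]
        · -- permutation
          have p2 : A ++ (Cl ++ (e + 1, -1) :: D) = (A ++ Cl) ++ ((e + 1, -1) :: D) := by
            rw [List.append_assoc]
          have p4 : (A ++ Cl) ++ D = T := by rw [List.append_assoc, ← hTeq]
          have p5 : (A ++ (Cl ++ (e + 1, -1) :: D)).Perm ((e + 1, -1) :: T) := by
            rw [p2, show T = (A ++ Cl) ++ D from p4.symm]
            exact List.perm_middle
          have hTp : (T ++ [(s, 1), (e + 1, -1)]).Perm
              (A ++ (s, 1) :: (Cl ++ (e + 1, -1) :: D)) := by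
            refine List.perm_append_comm.trans ?_
            exact ((List.perm_middle).trans (List.Perm.cons _ p5)).symm
          rw [List.flatMap_append]
          have h2 : List.flatMap flat2 [(s, e)] = [(s, 1), (e + 1, -1)] := by simp [flat2]
          rw [h2]
          refine (hperm.append (List.Perm.refl _)).trans ?_
          have hre : (E₀ ++ (bs, 1) :: T) ++ [(s, 1), (e + 1, -1)] =
              E₀ ++ ((bs, 1) :: (T ++ [(s, 1), (e + 1, -1)])) := by simp
          rw [hre]
          exact List.Perm.append_left E₀ (List.Perm.cons _ hTp)
        · -- sortedness
          rw [List.pairwise_append]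
          refine ⟨hsE.1, ?_, ?_⟩
          · refine List.pairwise_cons.mpr ⟨?_, ?_⟩
            · intro y hy
              rcases List.mem_append.mp hy with hy | hy
              · exact hbsT y (hmemA y hy)
              · rcases List.mem_cons.mp hy with hy | hy
                · subst hy
                  rw [evLE_pair]; omega
                · rcases List.mem_append.mp hy with hy | hy
                  · exact hbsT y (hmemCl y hy)
                  · rcases List.mem_cons.mp hy with hy | hy
                    · subst hy
                      exact Or.inl (by show bs < e + 1; omega)
                    · exact hbsT y (hmemD y hy)
            · -- Pairwise on A ++ (s,1) :: (Cl ++ (e+1,-1) :: D)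
              rw [List.pairwise_append]
              refine ⟨hAsorted, ?_, ?_⟩
              · refine List.pairwise_cons.mpr ⟨?_, ?_⟩
                · intro y hy
                  rcases List.mem_append.mp hy with hy | hy
                  · exact evLE_of_lt (hR y (hRCD ▸ List.mem_append_left _ hy))
                  · rcases List.mem_cons.mp hy with hy | hy
                    · subst hy
                      exact Or.inl (by show s < e + 1; omega)
                    · exact evLE_of_lt (hR y (hRCD ▸ List.mem_append_right _ hy))
                · rw [List.pairwise_append]
                  refine ⟨hClsorted, ?_, ?_⟩
                  · refine List.pairwise_cons.mpr ⟨?_, hDsorted⟩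
                    intro y hy
                    exact evLE_of_lt (hD y hy)
                  · intro a ha b hb
                    rcases List.mem_cons.mp hb with hb | hb
                    · subst hb; exact hCl a ha
                    · exact hCDcross a ha b hb
              · intro a ha b hb
                rcases List.mem_cons.mp hb with hb | hb
                · subst hb; exact hA a ha
                · rcases List.mem_append.mp hb with hb | hb
                  · exact hARcross a ha b (hRCD ▸ List.mem_append_left _ hb)
                  · rcases List.mem_cons.mp hb with hb | hb
                    · subst hb
                      exact Or.inl (by have := hAle a ha; show a.1 < e + 1; omega)
                    · exact hARcross a ha b (hRCD ▸ List.mem_append_right _ hb)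
          · intro a ha b hb
            have hbge : bs ≤ b.1 := by
              rcases List.mem_cons.mp hb with hb | hb
              · subst hb; exact le_refl _
              · rcases List.mem_append.mp hb with hb | hb
                · exact (hT b (hmemA b hb)).1
                · rcases List.mem_cons.mp hb with hb | hb
                  · subst hb; exact hbss
                  · rcases List.mem_append.mp hb with hb | hb
                    · exact (hT b (hmemCl b hb)).1
                    · rcases List.mem_cons.mp hb with hb | hb
                      · subst hb; show bs ≤ e + 1; omega
                      · exact (hT b (hmemD b hb)).1
            exact Or.inl (lt_of_lt_of_le (hE0 a ha) hbge)
        · -- member properties of the new block tail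
          intro ev hev
          rcases List.mem_append.mp hev with h | h
          · obtain ⟨h1, h2, h3⟩ := hT ev (hmemA ev h)
            exact ⟨h1, evLE_mono_be h2 hM1, h3⟩
          · rcases List.mem_cons.mp h with h | h
            · subst h
              refine ⟨hbss, ?_, Or.inl rfl⟩
              rw [evLE_pair]
              omega
            · rcases List.mem_append.mp h with h | h
              · obtain ⟨h1, h2, h3⟩ := hT ev (hmemCl ev h)
                exact ⟨h1, evLE_mono_be h2 hM1, h3⟩
              · rcases List.mem_cons.mp h with h | h
                · subst h
                  refine ⟨by show bs ≤ e + 1; omega, ?_, Or.inr rfl⟩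
                  rw [evLE_pair]
                  omega
                · obtain ⟨h1, h2, h3⟩ := hT ev (hmemD ev h)
                  exact ⟨h1, evLE_mono_be h2 hM1, h3⟩
        · -- getLast?
          by_cases hbe : be ≤ e
          · have hMe : max be e = e := max_eq_right hbe
            have hDnil : D = [] := by
              rw [List.eq_nil_iff_forall_not_mem]
              intro ev hev
              have h1 := hD ev hev
              have h2 := (hT ev (hmemD ev hev)).2.1
              obtain ⟨x1, x2⟩ := ev
              rw [evLt_pair] at h1
              rw [evLE_pair] at h2
              omega
            subst hDnil
            rw [hMe]
            have : A ++ (s, 1) :: (Cl ++ [(e + 1, -1)]) =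
                (A ++ (s, 1) :: Cl) ++ [(e + 1, -1)] := by simp
            rw [this, List.getLast?_concat]
          · have hMe : max be e = be := max_eq_left (by omega)
            have hmemb : (be + 1, -1) ∈ T := List.mem_of_getLast? hTlast
            have hbD : (be + 1, -1) ∈ D := by
              rw [hTeq] at hmemb
              rcases List.mem_append.mp hmemb with h | h
              · exfalso; have hle2 : be + 1 ≤ s := hAle _ h; omega
              · rcases List.mem_append.mp h with h | h
                · exfalso; have hle2 : be + 1 ≤ e + 1 := hClle _ h; omega
                · exact h
            have hDne : D ≠ [] := fun h => by simp [h] at hbD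
            rw [hMe]
            have : A ++ (s, 1) :: (Cl ++ (e + 1, -1) :: D) =
                (A ++ (s, 1) :: Cl ++ [(e + 1, -1)]) ++ D := by simp
            rw [this, getLast?_append_ne _ _ hDne]
            have hTD : T.getLast? = D.getLast? := by
              rw [hTeq, show A ++ (Cl ++ D) = (A ++ Cl) ++ D by simp,
                getLast?_append_ne _ _ hDne]
            rw [← hTD, hTlast]
        · -- sum of deltas
          have h1 := hTsum
          rw [hTeq] at h1
          simp only [sumd_append, sumd_cons] at h1 ⊢
          omega
        · -- prefix condition
          have key2 : (0 < 1 + sumd A ∨ s = lastCoord bs A) ∧ 0 ≤ 1 + sumd A := by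
            cases hCD : Cl ++ D with
            | nil =>
              have hTA : T = A := by rw [hTeq, hCD]; simp
              have hls : s = lastCoord bs A := by
                have hmem : (be + 1, -1) ∈ A := by
                  rw [← hTA]; exact List.mem_of_getLast? hTlast
                have h1 : be + 1 ≤ s := hAle _ hmem
                have hlc : lastCoord bs A = be + 1 := by
                  rw [← hTA]; simp [lastCoord, hTlast]
                omega
              have hsA : sumd A = -1 := by rw [← hTA]; exact hTsum
              exact ⟨Or.inr hls, by omega⟩
            | cons w rest =>
              have hsp := hTpre A w rest (by rw [hTeq, hCD])
              rcases hsp with ⟨hd | hd, hn⟩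
              · exact ⟨Or.inl hd, hn⟩
              · exfalso
                have hw : s < w.1 := by
                  have hmem : w ∈ Cl ++ D := by rw [hCD]; simp
                  rcases List.mem_append.mp hmem with h | h
                  · exact hClgt w h
                  · exact hDgt w h
                have hlc : lastCoord bs A ≤ s := lastCoord_le A hbss hAle
                omega
          have key4 : (0 < 1 + sumd (A ++ (s, 1) :: Cl) ∧ 0 ≤ 1 + sumd (A ++ (s, 1) :: Cl)) := by
            have hnn : 0 ≤ 1 + sumd (A ++ Cl) := by
              cases hDD : D with
              | nil =>
                have hTS : sumd T = sumd (A ++ Cl) := by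
                  rw [hTeq, hDD]
                  simp [sumd_append]
                omega
              | cons w rest =>
                have hsp := hTpre (A ++ Cl) w rest (by rw [hTeq, hDD]; simp)
                exact hsp.2
            simp only [sumd_append, sumd_cons] at hnn ⊢
            omega
          intro T₁ ev T₂ hsplit
          rcases List.append_eq_append_iff.mp hsplit with ⟨as, hT₁, hrest⟩ | ⟨b', hAeq, hbx⟩
          · -- T₁ reaches (s,1) or beyond
            rcases as with _ | ⟨a0, as'⟩
            · -- boundary: ev = (s,1), T₁ = A
              simp only [List.nil_append, List.cons.injEq] at hrest
              obtain ⟨hev1, _⟩ := hrest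
              simp only [List.append_nil] at hT₁
              subst hT₁
              rw [← hev1]
              exact key2
            · simp only [List.cons_append, List.cons.injEq] at hrest
              obtain ⟨ha0, hrest2⟩ := hrest
              subst hT₁
              -- Cl ++ (e+1,-1) :: D = as' ++ ev :: T₂
              rcases List.append_eq_append_iff.mp hrest2.symm with
                ⟨cs, hCl2, hrest3⟩ | ⟨ds, has', hrest3⟩
              · -- hCl2 : Cl = as' ++ cs, hrest3 : ev :: T₂ = cs ++ (e+1,-1) :: D
                rcases cs with _ | ⟨c0, cs'⟩
                · -- ev = (e+1,-1), as' = Cl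
                  simp only [List.nil_append, List.cons.injEq] at hrest3
                  obtain ⟨hev1, _⟩ := hrest3
                  simp only [List.append_nil] at hCl2
                  subst hCl2
                  rw [← ha0]
                  exact ⟨Or.inl key4.1, key4.2⟩
                · -- ev = c0 ∈ Cl
                  simp only [List.cons_append, List.cons.injEq] at hrest3
                  obtain ⟨hc0, hT₂⟩ := hrest3
                  have hsp := hTpre (A ++ as') ev (cs' ++ D)
                    (by rw [hTeq, hCl2, hc0]; simp)
                  have hnn := hsp.2
                  rw [← ha0]
                  simp only [sumd_append, sumd_cons] at hnn ⊢
                  exact ⟨Or.inl (by omega), by omega⟩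
              · -- has' : as' = Cl ++ ds, hrest3 : (e+1,-1) :: D = ds ++ ev :: T₂
                rcases ds with _ | ⟨d0, ds'⟩
                · -- ev = (e+1,-1), as' = Cl
                  simp only [List.nil_append, List.cons.injEq] at hrest3
                  obtain ⟨hev1, _⟩ := hrest3
                  simp only [List.append_nil] at has'
                  subst has'
                  rw [← ha0, ← hev1]
                  exact ⟨Or.inl key4.1, key4.2⟩
                · -- ev ∈ D: D = ds' ++ ev :: T₂, d0 = (e+1,-1)
                  simp only [List.cons_append, List.cons.injEq] at hrest3
                  obtain ⟨hd0, hDeq⟩ := hrest3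
                  subst has'
                  have hsp := hTpre (A ++ (Cl ++ ds')) ev T₂
                    (by rw [hTeq, hDeq]; simp)
                  have hevD : ev ∈ D := by rw [hDeq]; simp
                  rcases hsp with ⟨hd | hd, hn⟩
                  · rw [← ha0, ← hd0]
                    simp only [sumd_append, sumd_cons] at hd hn ⊢
                    exact ⟨Or.inl (by omega), by omega⟩
                  · -- right disjunct transfers
                    rcases ds' with _ | ⟨w, ws⟩
                    · have hlc1 : lastCoord bs (A ++ (Cl ++ [])) ≤ e + 1 := by
                        refine lastCoord_le _ (by omega) ?_
                        intro x hx
                        rcases List.mem_append.mp hx with h | h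
                        · have := hAle x h; omega
                        · simp only [List.append_nil] at h
                          exact hClle x h
                      have hge := hDge ev hevD
                      have hlc2 : lastCoord bs (A ++ (s, 1) :: (Cl ++ (e + 1, -1) :: [])) =
                          e + 1 := by
                        rw [show A ++ (s, 1) :: (Cl ++ (e + 1, -1) :: ([] : List (Int × Int))) =
                            (A ++ (s, 1) :: Cl) ++ [(e + 1, -1)] by simp,
                          lastCoord_concat]
                      refine ⟨Or.inr ?_, ?_⟩
                      · rw [← ha0, ← hd0, hlc2]
                        omega
                      · rw [← ha0, ← hd0]
                        simp only [sumd_append, sumd_cons] at hn ⊢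
                        omega
                    · have hne : w :: ws ≠ ([] : List (Int × Int)) := by simp
                      have hlc1 : lastCoord bs (A ++ (Cl ++ w :: ws)) =
                          lastCoord bs (w :: ws) := by
                        rw [show A ++ (Cl ++ w :: ws) = (A ++ Cl) ++ w :: ws by simp,
                          lastCoord_append _ _ _ hne]
                      have hlc2 : lastCoord bs (A ++ (s, 1) :: (Cl ++ (e + 1, -1) :: w :: ws)) =
                          lastCoord bs (w :: ws) := by
                        rw [show A ++ (s, 1) :: (Cl ++ (e + 1, -1) :: w :: ws) =
                            (A ++ (s, 1) :: Cl ++ [(e + 1, -1)]) ++ w :: ws by simp,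
                          lastCoord_append _ _ _ hne]
                      refine ⟨Or.inr ?_, ?_⟩
                      · rw [← ha0, ← hd0, hlc2, ← hlc1]
                        exact hd
                      · rw [← ha0, ← hd0]
                        simp only [sumd_append, sumd_cons] at hn ⊢
                        omega
          · -- ev inside A or at the boundary
            rcases b' with _ | ⟨ev', b''⟩
            · simp only [List.nil_append] at hbx
              simp only [List.append_nil] at hAeq
              rw [List.cons.injEq] at hbx
              obtain ⟨hev1, _⟩ := hbx
              subst hAeq
              rw [hev1]
              exact key2
            · rw [List.cons_append, List.cons.injEq] at hbx
              obtain ⟨hev1, _⟩ := hbx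
              subst hev1
              exact hTpre T₁ ev (b'' ++ (Cl ++ D))
                (by rw [hTeq, hAeq]; simp)
        · obtain ⟨e', he'⟩ := hbsmem
          exact ⟨e', List.mem_append_left _ he'⟩

-- ===== VERDICT (by name: the statement is the Claim_ definition above) =====
theorem countDays_spec : Claim_equal_countDays := by
  intro days ms _ hpre
  unfold Spec_countDays
  have hB : countDays_alt days ms =
      days - ((PySem.List.sorted2 (eventsOf ms) (fun ev => ev.1) (fun ev => ev.2)).foldl
        sweepStep (0, 0, 0)).1 := rfl
  have hA0 : countDays days ms =
      ((PySem.List.sorted ms (fun m => m)).foldl stepA (days, 0)).1 := rfl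
  rw [hB, hA0]
  have hlen : ∀ m ∈ PySem.List.sorted ms (fun m => m), m.length = 2 := by
    intro m hm
    exact hpre m ((PySem.List.mem_sorted ms (fun m => m) false m).1 hm)
  have hsortList : (PySem.List.sorted ms (fun m => m)).Pairwise
      (fun (a b : List Int) => a ≤ b) := by
    have heq : PySem.List.sorted ms (fun m => m) false
        = @PySem.List.sorted (List Int) (List Int) List.instLinearOrder.toLT
            LinearOrder.toDecidableLT ms (fun m => m) false := by congr 1
    rw [heq]
    exact PySem.List.sorted_pairwise ms (fun m => m)
  have hAmain := main_loop (PySem.List.sorted ms (fun m => m)) days 0 0 none hlen hsortList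
    ⟨le_refl 0, by intro m hm; exact le_max_right _ 1⟩
  rw [hAmain, foldl_stepB_eq_mstep]
  have hval : ∀ iv ∈ (PySem.List.sorted ms (fun m => m)).filterMap clip1,
      1 ≤ iv.1 ∧ iv.1 ≤ iv.2 := by
    intro iv hiv
    obtain ⟨m, _, hc⟩ := List.mem_filterMap.mp hiv
    match m with
    | [] => simp [clip1] at hc
    | [_] => simp [clip1] at hc
    | a :: b :: x :: r => simp [clip1] at hc
    | [s0, e] =>
      simp only [clip1] at hc
      by_cases h : e < max s0 1
      · rw [if_pos h] at hc; exact absurd hc (by simp)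
      · rw [if_neg h] at hc
        have : (max s0 1, e) = iv := Option.some.inj hc
        subst this
        exact ⟨le_max_right s0 1, by omega⟩
  have hsortI : ((PySem.List.sorted ms (fun m => m)).filterMap clip1).Pairwise
      (fun a b => a.1 ≤ b.1) := by
    refine List.Pairwise.filterMap clip1 ?_ hsortList
    intro m m' hmm iv hiv iv' hiv'
    match m, m' with
    | [s0, e], [s1, e1] =>
      simp only [clip1] at hiv hiv'
      by_cases h : e < max s0 1
      · rw [if_pos h] at hiv; exact absurd hiv (by simp)
      · by_cases h' : e1 < max s1 1
        · rw [if_pos h'] at hiv'; exact absurd hiv' (by simp)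
        · rw [if_neg h] at hiv; rw [if_neg h'] at hiv'
          have h1 : (max s0 1, e) = iv := Option.some.inj hiv
          have h2 : (max s1 1, e1) = iv' := Option.some.inj hiv'
          subst h1; subst h2
          have := head_le_of_le_pair s0 e s1 e1 hmm
          simp only []
          omega
    | [], _ => simp [clip1] at hiv
    | [_], _ => simp [clip1] at hiv
    | a :: b :: x :: r, _ => simp [clip1] at hiv
    | [_, _], [] => simp [clip1] at hiv'
    | [_, _], [_] => simp [clip1] at hiv'
    | [_, _], a :: b :: x :: r => simp [clip1] at hiv'
  have hperm1 : (eventsOf ms).Perm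
      (((PySem.List.sorted ms (fun m => m)).filterMap clip1).flatMap flat2) := by
    rw [eventsOf_eq_flatMap ms]
    exact (List.Perm.filterMap clip1
      (PySem.List.sorted_perm ms (fun m => m) false).symm).flatMap (fun a _ => List.Perm.refl _)
  rcases main_inv ((PySem.List.sorted ms (fun m => m)).filterMap clip1) hval hsortI with
    ⟨hfold, hInil⟩ |
    ⟨C, bs, be, E₀, T, hfold, hperm, hsortE, hE0, hT, hE0fold, hTne, hTlast, hTsum, hTpre,
      hbs1, hbsbe, _⟩
  · rw [hfold]
    have hnil : eventsOf ms = [] := by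
      have h := hperm1
      rw [hInil] at h
      exact h.eq_nil
    rw [hnil]
    simp [finishB, PySem.List.sorted2]
  · have hes : PySem.List.sorted2 (eventsOf ms) (fun ev => ev.1) (fun ev => ev.2) =
        E₀ ++ (bs, 1) :: T :=
      sorted2_eq_of_perm_of_pairwise _ _ (hperm.symm.trans hperm1.symm) hsortE
    rw [hfold, hes, List.foldl_append]
    obtain ⟨p', hp'⟩ := hE0fold 0 0
    rw [hp', block_fold T bs be hTlast hTsum hTpre (0 + C) p']
    simp only [finishB]
    ring
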